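-- pv_equiv track=rewrite | github.com/moonmeks/tasks_lab | task1/task1.py | array_path
-- ===== SOURCE A (Python) =====
-- def array_path(n, m):
--     array = list(range(1, n + 1))
--     path = []
--     current_pos = 0
--
--     while True:
--         path.append(array[current_pos])
--         current_pos = (current_pos + m - 1) % n
--         if current_pos == 0:
--             break
--
--     return ''.join(map(str, path))
-- ===== SOURCE B (Python) =====
-- def array_path(n, m):
--     # walk step per visit is (m-1); cycle length back to start is n // gcd(n, m-1)
--     s = (m - 1) % n
--     g = n
--     b = s
--     while b:
--         g, b = b, g % b
--     cycle_len = n // g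
--     return ''.join(str((i * s) % n + 1) for i in range(cycle_len))
-- ===== Notes on version B (the rewrite author's own statement) =====
-- stated objective: alternative
-- what changed: B replaces A's incremental position-threading walk (build array, append, step, test) with a closed computation: the step s=(m-1)%n, a Euclid-loop gcd giving the cycle length n//gcd(n,s), and a single join over a generator computing each visited position directly as (i*s)%n+1.
import Mathlib
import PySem

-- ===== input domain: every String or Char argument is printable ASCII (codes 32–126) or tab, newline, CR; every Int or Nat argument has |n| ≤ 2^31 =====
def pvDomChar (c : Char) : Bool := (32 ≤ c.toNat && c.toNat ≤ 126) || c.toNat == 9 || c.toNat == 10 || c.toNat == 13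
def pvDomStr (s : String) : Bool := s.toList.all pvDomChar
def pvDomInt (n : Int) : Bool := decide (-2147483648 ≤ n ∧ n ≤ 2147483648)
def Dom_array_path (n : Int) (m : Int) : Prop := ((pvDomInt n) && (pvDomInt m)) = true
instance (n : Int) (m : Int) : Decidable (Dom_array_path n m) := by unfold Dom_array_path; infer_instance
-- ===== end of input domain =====

-- B replaces A's incremental position walk with a gcd-derived cycle length and a direct
-- index→position formula (objective: alternative decomposition; no speed claim).

-- ===== PORT A =====
-- A's 'while True' walk; fuel is only a totality guard: the walk returns to position 0
-- after at most n steps, so fuel n.toNat is never exhausted when n ≥ 1 (Pre_).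
def arrayPathLoop (array : List Int) (n : Int) (m : Int) (cur : Int) (path : List Int) :
    Nat → List Int
  | 0 => path
  | fuel + 1 =>
    match PySem.List.pyGet? array cur with
    | none => path          -- IndexError in Python; outside Pre_
    | some v =>
      let path' := path ++ [v]
      let cur' := PySem.Int.mod (cur + m - 1) n
      if cur' = 0 then path' else arrayPathLoop array n m cur' path' fuel

def array_path (n : Int) (m : Int) : String :=
  let array := PySem.List.pyRange 1 (n + 1) 1
  let path := arrayPathLoop array n m 0 [] n.toNat
  PySem.Str.join "" (path.map PySem.Int.toStr)

-- ===== PORT B =====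
-- hand-written Euclid loop from Source B
def pyGcdLoop (g : Int) (b : Int) : Int :=
  if h : b = 0 then g else pyGcdLoop b (PySem.Int.mod g b)
termination_by b.natAbs
decreasing_by
  have h1 := PySem.Int.mod_nonneg g (b := b)
  have h2 := PySem.Int.mod_lt g (b := b)
  have h3 := PySem.Int.mod_neg_bounds g (b := b)
  rcases lt_trichotomy b 0 with hb | hb | hb
  · have := h3 hb; omega
  · exact absurd hb h
  · have := h1 hb; have := h2 hb; omega

def array_path_alt (n : Int) (m : Int) : String :=
  let s := PySem.Int.mod (m - 1) n
  let g := pyGcdLoop n s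
  let cycleLen := PySem.Int.floordiv n g
  PySem.Str.join ""
    ((PySem.List.pyRange 0 cycleLen 1).map
      (fun i => PySem.Int.toStr (PySem.Int.mod (i * s) n + 1)))

-- ===== PRECONDITION & SPEC =====
-- Pre_ excludes exactly n ≤ 0, where Python A raises IndexError (array[0] on an empty list).
def Pre_array_path (n : Int) (m : Int) : Prop := 1 ≤ n
instance (n : Int) (m : Int) : Decidable (Pre_array_path n m) := by
  unfold Pre_array_path; infer_instance

def pvWitness_array_path : Int × Int := (6, 5)

def Spec_array_path (n : Int) (m : Int) (out : String) : Prop := out = array_path_alt n m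
instance (n : Int) (m : Int) (out : String) : Decidable (Spec_array_path n m out) := by
  unfold Spec_array_path; infer_instance

-- ===== CLAIM (what is proved, stated in full; the proofs are below) =====
def Claim_equal_array_path : Prop :=
  ∀ (n : Int) (m : Int), Dom_array_path n m → Pre_array_path n m →
    Spec_array_path n m (array_path n m)

-- ===== LEMMAS AND PROOFS =====

-- the Euclid loop computes the gcd (for the arguments it is called with: 0 < a, 0 ≤ b)
theorem pyGcdLoop_eq (a b : Int) (ha : 0 < a) (hb : 0 ≤ b) :
    pyGcdLoop a b = ((Nat.gcd a.toNat b.toNat : Nat) : Int) := by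
  by_cases h : b = 0
  · subst h; rw [pyGcdLoop]; simp [Nat.gcd_zero_right]; omega
  · have hbpos : 0 < b := lt_of_le_of_ne hb (Ne.symm h)
    have h1 : 0 ≤ a % b := Int.emod_nonneg a (by omega)
    have htn : a % b = ((a.toNat % b.toNat : Nat) : Int) := by
      have ha' : ((a.toNat : Nat) : Int) = a := Int.toNat_of_nonneg ha.le
      have hb' : ((b.toNat : Nat) : Int) = b := Int.toNat_of_nonneg hb
      push_cast
      rw [ha', hb']
    rw [pyGcdLoop, dif_neg h, PySem.Int.mod_eq_emod_of_pos hbpos,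
        pyGcdLoop_eq b (a % b) hbpos h1, htn, Int.toNat_natCast,
        Nat.gcd_comm b.toNat, ← Nat.gcd_rec, Nat.gcd_comm]
termination_by b.natAbs
decreasing_by
  have := Int.emod_nonneg a (show b ≠ 0 from h)
  have := Int.emod_lt_of_pos a (by omega : 0 < b)
  omega


-- key number-theoretic fact: position k*s is 0 mod n exactly at multiples of N / gcd N S
theorem nat_key (N S k : Nat) (hN : 0 < N) :
    (N ∣ k * S ↔ N / Nat.gcd N S ∣ k) := by
  set G := Nat.gcd N S with hG
  have hGpos : 0 < G := Nat.gcd_pos_of_pos_left S hN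
  obtain ⟨N', hN'⟩ := (Nat.gcd_dvd_left N S : G ∣ N)
  obtain ⟨S', hS'⟩ := (Nat.gcd_dvd_right N S : G ∣ S)
  rw [← hG] at hN' hS'
  have hdivN : N / G = N' := by rw [hN']; exact Nat.mul_div_cancel_left N' hGpos
  have hdivS : S / G = S' := by rw [hS']; exact Nat.mul_div_cancel_left S' hGpos
  have cop : Nat.Coprime N' S' := by
    have := Nat.coprime_div_gcd_div_gcd (m := N) (n := S) hGpos
    rwa [← hG, hdivN, hdivS] at this
  rw [hdivN]
  constructor
  · intro hd
    have : N' ∣ k * S' := by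
      have : G * N' ∣ G * (k * S') := by
        calc G * N' = N := hN'.symm
        _ ∣ k * S := hd
        _ = G * (k * S') := by rw [hS']; ring
      exact (Nat.mul_dvd_mul_iff_left hGpos).mp this
    exact cop.dvd_of_dvd_mul_right this
  · rintro ⟨t, rfl⟩
    exact ⟨t * S', by rw [hN', hS']; ring⟩
-- characterisation of A's walk: starting at position i*s mod n with i+d = L it appends
-- exactly the d values at positions (i+j)*s mod n, j < d
theorem loopA_eq (n m s : Int) (hn : 0 < n) (hs : s = PySem.Int.mod (m - 1) n)
    (L : Nat) (hL : ∀ k : Nat, (PySem.Int.mod ((k : Int) * s) n = 0 ↔ L ∣ k)) :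
    ∀ (d i : Nat) (acc : List Int) (fuel : Nat), i + d = L → 1 ≤ d → d ≤ fuel →
      arrayPathLoop (PySem.List.pyRange 1 (n + 1) 1) n m
          (PySem.Int.mod ((i : Int) * s) n) acc fuel
        = acc ++ (List.range d).map
            (fun j => PySem.Int.mod (((i + j : Nat) : Int) * s) n + 1) := by
  have hs1 : 0 ≤ s := hs ▸ PySem.Int.mod_nonneg (m - 1) hn
  have hP : ∀ k : Nat, 0 ≤ PySem.Int.mod ((k : Int) * s) n ∧
      PySem.Int.mod ((k : Int) * s) n < n :=
    fun k => ⟨PySem.Int.mod_nonneg _ hn, PySem.Int.mod_lt _ hn⟩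
  have hget : ∀ k : Nat, PySem.List.pyGet? (PySem.List.pyRange 1 (n + 1) 1)
      (PySem.Int.mod ((k : Int) * s) n) = some (PySem.Int.mod ((k : Int) * s) n + 1) := by
    intro k
    obtain ⟨h0, h1⟩ := hP k
    rw [PySem.List.pyGet?_of_nonneg _ h0, PySem.List.pyRange_one]
    rw [List.getElem?_map, List.getElem?_range (by omega)]
    simp only [Option.map_some]
    congr 1
    omega
  have hstep : ∀ k : Nat, PySem.Int.mod (PySem.Int.mod ((k : Int) * s) n + m - 1) n
      = PySem.Int.mod (((k + 1 : Nat) : Int) * s) n := by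
    intro k
    rw [PySem.Int.mod_eq_emod_of_pos hn, PySem.Int.mod_eq_emod_of_pos hn,
        PySem.Int.mod_eq_emod_of_pos hn]
    have e2 : (m - 1) % n = s := by rw [hs, PySem.Int.mod_eq_emod_of_pos hn]
    have e1 : s % n = s := Int.emod_eq_of_lt hs1 (hs ▸ PySem.Int.mod_lt (m - 1) hn)
    calc ((k : Int) * s % n + m - 1) % n
        = ((k : Int) * s % n % n + (m - 1) % n) % n := by
          rw [Int.add_sub_assoc, Int.add_emod]
      _ = ((k : Int) * s % n + s) % n := by rw [Int.emod_emod_of_dvd _ dvd_rfl, e2]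
      _ = ((k : Int) * s % n + s % n) % n := by rw [e1]
      _ = ((k : Int) * s + s) % n := by rw [← Int.add_emod]
      _ = (((k + 1 : Nat) : Int) * s) % n := by push_cast; ring_nf
  intro d
  induction d with
  | zero => intro i acc fuel _ h1 _; omega
  | succ d ih =>
    intro i acc fuel hiL _ hfuel
    obtain ⟨f, rfl⟩ : ∃ f, fuel = f + 1 := ⟨fuel - 1, by omega⟩
    rw [arrayPathLoop, hget i]
    simp only []
    rw [hstep i]
    by_cases hd : d = 0
    · subst hd
      have : PySem.Int.mod (((i + 1 : Nat) : Int) * s) n = 0 := (hL (i + 1)).mpr ⟨1, by omega⟩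
      rw [if_pos this]
      simp
    · have hne : PySem.Int.mod (((i + 1 : Nat) : Int) * s) n ≠ 0 := by
        intro h0
        have := (hL (i + 1)).mp h0
        have := Nat.le_of_dvd (by omega) this
        omega
      rw [if_neg hne, ih (i + 1) (acc ++ [PySem.Int.mod ((i : Int) * s) n + 1]) f
          (by omega) (by omega) (by omega)]
      have hmap : (List.range (d + 1)).map
            (fun j => PySem.Int.mod (((i + j : Nat) : Int) * s) n + 1)
          = (PySem.Int.mod ((i : Int) * s) n + 1) ::
            (List.range d).map (fun j => PySem.Int.mod (((i + 1 + j : Nat) : Int) * s) n + 1) := by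
        rw [List.range_succ_eq_map, List.map_cons, List.map_map]
        congr 1
        apply List.map_congr_left
        intro a _
        simp only [Function.comp_apply]
        congr 1
        push_cast
        ring_nf
      rw [hmap, List.append_assoc, List.singleton_append]
-- A = B for every n ≥ 1
theorem main (n m : Int) (hn : 0 < n) : array_path n m = array_path_alt n m := by
  simp only [array_path, array_path_alt]
  set s := PySem.Int.mod (m - 1) n with hs
  have hs1 : 0 ≤ s := PySem.Int.mod_nonneg (m - 1) hn
  have hs2 : s < n := PySem.Int.mod_lt (m - 1) hn
  set N := n.toNat with hN
  set S := s.toNat with hS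
  have hn' : ((N : Nat) : Int) = n := Int.toNat_of_nonneg hn.le
  have hs' : ((S : Nat) : Int) = s := Int.toNat_of_nonneg hs1
  have hNpos : 0 < N := by omega
  set G := Nat.gcd N S with hG
  have hGpos : 0 < G := Nat.gcd_pos_of_pos_left S hNpos
  set L := N / G with hLdef
  have hL1 : 1 ≤ L := Nat.div_pos (Nat.le_of_dvd hNpos (Nat.gcd_dvd_left N S)) hGpos
  have hLN : L ≤ N := Nat.div_le_self N G
  -- gcd value
  have hgcd : pyGcdLoop n s = ((G : Nat) : Int) := pyGcdLoop_eq n s hn hs1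
  -- cycle length value
  have hcyc : PySem.Int.floordiv n (pyGcdLoop n s) = ((L : Nat) : Int) := by
    rw [hgcd, ← hn', PySem.Int.floordiv_natCast]
  -- divisibility characterisation
  have hL : ∀ k : Nat, (PySem.Int.mod ((k : Int) * s) n = 0 ↔ L ∣ k) := by
    intro k
    rw [PySem.Int.mod_eq_zero_iff_dvd]
    have : (n ∣ (k : Int) * s) ↔ (N ∣ k * S) := by
      rw [← hn', ← hs', ← Nat.cast_mul, Int.natCast_dvd_natCast]
    rw [this]
    exact nat_key N S k hNpos
  -- A's path
  have hzero : (0 : Int) = PySem.Int.mod (((0 : Nat) : Int) * s) n := by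
    rw [Nat.cast_zero, zero_mul, PySem.Int.mod_eq_emod_of_pos hn, Int.zero_emod]
  have hpath : arrayPathLoop (PySem.List.pyRange 1 (n + 1) 1) n m 0 [] N
      = (List.range L).map (fun j : Nat => PySem.Int.mod ((j : Int) * s) n + 1) := by
    rw [hzero, loopA_eq n m s hn hs L hL L 0 [] N (by omega) hL1 hLN, List.nil_append]
    apply List.map_congr_left
    intro j _
    simp
  rw [hpath, hcyc]
  congr 1
  rw [List.map_map, PySem.List.pyRange_one]
  simp only [sub_zero, Int.toNat_natCast, List.map_map]
  apply List.map_congr_left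
  intro k _
  simp

-- ===== VERDICT (by name: the statement is the Claim_ definition above) =====
theorem array_path_spec : Claim_equal_array_path := by
  intro n m _ hpre
  unfold Spec_array_path
  exact main n m (by unfold Pre_array_path at hpre; omega)
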